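-- pv_equiv track=rewrite | github.com/mscroggs/KLBFAX | pages/wildlife.py | split_az
-- ===== SOURCE A (Python) =====
-- def split_az(text):
--     out = []
--     next = ""
--     for char in text.lower()+".":
--         if char in "abcdefghijklmnopqrstuvwxyz":
--             next += char
--         else:
--             if next != "":
--                 out.append(next)
--             next = ""
--     return out
-- ===== SOURCE B (Python) =====
-- import re
--
-- def split_az(text):
--     return re.findall(r'[a-z]+', text.lower())
-- ===== Notes on version B (the rewrite author's own statement) =====
-- stated objective: idiomatic
-- what changed: Replaces the character-by-character accumulator loop with its appended dot sentinel by a single regex call extracting all maximal runs of ASCII lowercase letters from the lowered text.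
import Mathlib
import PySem

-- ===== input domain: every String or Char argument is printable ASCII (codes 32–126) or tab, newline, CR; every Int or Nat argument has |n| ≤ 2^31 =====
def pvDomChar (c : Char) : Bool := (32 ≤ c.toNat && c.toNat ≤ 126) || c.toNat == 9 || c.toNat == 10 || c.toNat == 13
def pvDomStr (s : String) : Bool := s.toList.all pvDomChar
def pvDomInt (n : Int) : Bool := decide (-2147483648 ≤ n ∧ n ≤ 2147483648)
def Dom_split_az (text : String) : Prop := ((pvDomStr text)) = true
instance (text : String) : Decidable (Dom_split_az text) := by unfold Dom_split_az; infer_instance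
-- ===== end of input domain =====

-- B replaces A's character-accumulator loop (with its appended sentinel dot) by the idiomatic
-- "extract all maximal lowercase-letter runs" (re.findall(r'[a-z]+', ...) in Python,
-- List.splitOnP in the port); a timing run measured B faster by a constant factor.


-- ===== PORT A =====
-- 'char in "abc…z"' (membership of a char in the literal alphabet string)
def pvIsAz (c : Char) : Bool := "abcdefghijklmnopqrstuvwxyz".toList.contains c

-- one iteration of A's for-loop; the growing string 'next' is kept as its char list (exact)
def splitAzStep (st : List String × List Char) (c : Char) : List String × List Char :=
  if pvIsAz c then (st.1, st.2 ++ [c])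
  else (if st.2 ≠ [] then st.1 ++ [String.mk st.2] else st.1, ([] : List Char))

def split_az (text : String) : List String :=
  ((((PySem.Str.lower text).toList) ++ ['.']).foldl splitAzStep ([], [])).1

-- ===== PORT B =====
-- re.findall(r'[a-z]+', lowered) = the nonempty maximal runs of letters: split the
-- char list on non-letters, drop the empty chunks (exact for this regex on any input)
def split_az_alt (text : String) : List String :=
  ((((PySem.Str.lower text).toList).splitOnP (fun c => !pvIsAz c)).filter
      (fun l => !l.isEmpty)).map (fun l => String.mk l)

-- ===== PRECONDITION & SPEC =====
def Spec_split_az (text : String) (out : List String) : Prop := out = split_az_alt text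
instance (text : String) (out : List String) : Decidable (Spec_split_az text out) := by unfold Spec_split_az; infer_instance

-- ===== CLAIM (what is proved, stated in full; the proofs are below) =====
def Claim_equal_split_az : Prop := ∀ (text : String), Dom_split_az text → Spec_split_az text (split_az text)

-- ===== LEMMAS AND PROOFS =====

-- B's body as a function of the char list
def pvRuns (cs : List Char) : List String :=
  ((cs.splitOnP (fun c => !pvIsAz c)).filter (fun l => !l.isEmpty)).map (fun l => String.mk l)

theorem splitOnP_all_neg (cs : List Char) (h : ∀ a ∈ cs, pvIsAz a = true) :
    cs.splitOnP (fun c => !pvIsAz c) = [cs] := by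
  induction cs with
  | nil => simp [List.splitOnP_nil]
  | cons x xs ih =>
    rw [List.splitOnP_cons]
    have hx : pvIsAz x = true := h x (by simp)
    simp only [hx, Bool.not_true]
    rw [ih (fun a ha => h a (by simp [ha]))]
    simp

theorem splitOnP_run_split (next cs : List Char) (c : Char)
    (hn : ∀ a ∈ next, pvIsAz a = true) (hc : pvIsAz c = false) :
    (next ++ c :: cs).splitOnP (fun c => !pvIsAz c)
      = next :: cs.splitOnP (fun c => !pvIsAz c) := by
  induction next with
  | nil => simp [List.splitOnP_cons, hc]
  | cons x xs ih =>
    have hx : pvIsAz x = true := hn x (by simp)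
    rw [List.cons_append, List.splitOnP_cons]
    simp only [hx, Bool.not_true]
    rw [ih (fun a ha => hn a (by simp [ha]))]
    simp

theorem pvRuns_all (next : List Char) (h : ∀ a ∈ next, pvIsAz a = true) :
    pvRuns next = if next = [] then [] else [String.mk next] := by
  unfold pvRuns
  rw [splitOnP_all_neg next h]
  cases next <;> simp

theorem pvRuns_split (next cs : List Char) (c : Char)
    (hn : ∀ a ∈ next, pvIsAz a = true) (hc : pvIsAz c = false) :
    pvRuns (next ++ c :: cs)
      = (if next = [] then [] else [String.mk next]) ++ pvRuns cs := by
  unfold pvRuns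
  rw [splitOnP_run_split next cs c hn hc]
  cases next <;> simp

theorem foldl_step_runs (cs : List Char) : ∀ (out : List String) (next : List Char),
    (∀ a ∈ next, pvIsAz a = true) →
    ((cs ++ ['.']).foldl splitAzStep (out, next)).1 = out ++ pvRuns (next ++ cs) := by
  induction cs with
  | nil =>
    intro out next hn
    have hdot : pvIsAz '.' = false := by decide
    simp only [List.nil_append, List.foldl_cons, List.foldl_nil, splitAzStep, hdot,
      if_false, List.append_nil]
    rw [pvRuns_all next hn]
    by_cases h : next = [] <;> simp [h]
  | cons c cs ih =>
    intro out next hn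
    by_cases hc : pvIsAz c = true
    · have : ∀ a ∈ next ++ [c], pvIsAz a = true := by
        intro a ha; rcases List.mem_append.mp ha with h | h
        · exact hn a h
        · simp at h; subst h; exact hc
      simp only [List.cons_append, List.foldl_cons, splitAzStep, hc, if_true]
      rw [ih out (next ++ [c]) this]
      simp
    · have hc' : pvIsAz c = false := by simpa using hc
      simp only [List.cons_append, List.foldl_cons, splitAzStep, hc', Bool.false_eq_true,
        if_false]
      rw [pvRuns_split next cs c hn hc']
      split
      · next hne =>
        rw [ih (out ++ [String.mk next]) [] (by simp)]
        simp only [List.nil_append]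
        have : next ≠ [] := hne
        simp [List.append_assoc]
      · next hne =>
        rw [ih out [] (by simp)]
        have : next = [] := by by_contra h; exact hne h
        simp [this]

-- ===== VERDICT (by name: the statement is the Claim_ definition above) =====
theorem split_az_spec : Claim_equal_split_az := by
  intro text _
  unfold Spec_split_az split_az split_az_alt
  rw [foldl_step_runs ((PySem.Str.lower text).toList) [] [] (by simp)]
  simp [pvRuns]
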